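-- pv_equiv track=rewrite | github.com/KimSieber/AdventOfCode | 2023/#09 Mirage Maintenance.py | completeSensorWithSequences
-- ===== SOURCE A (Python) =====
-- def completeSensorWithSequences(Sensor: list) -> list:
--     Sensor     = [Sensor]
--     NextValues = Sensor[0]
--     ### Find Sequences until all Sequences are 0
--     while not all([v==0 for v in NextValues]):
--         Spaces = []
--         for Key in range(len(NextValues)-1):
--             Spaces.append(NextValues[Key+1] - NextValues[Key])
--         NextValues = Spaces
--         Sensor.append(NextValues)
--     return Sensor
-- ===== SOURCE B (Python) =====
-- def completeSensorWithSequences(Sensor: list) -> list: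
--     def expand(seq):
--         if all(v == 0 for v in seq):
--             return [seq]
--         diff = [b - a for a, b in zip(seq, seq[1:])]
--         return [seq] + expand(diff)
--     return expand(Sensor)
-- ===== Notes on version B (the rewrite author's own statement) =====
-- stated objective: simpler
-- what changed: Replaces the imperative while-loop that mutates an accumulator and an index-based inner loop with a recursive helper expressing the recurrence expansion(seq) = [seq] + expansion(diff), the difference row built by zipping the sequence with its own tail instead of indexing.
import Mathlib
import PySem

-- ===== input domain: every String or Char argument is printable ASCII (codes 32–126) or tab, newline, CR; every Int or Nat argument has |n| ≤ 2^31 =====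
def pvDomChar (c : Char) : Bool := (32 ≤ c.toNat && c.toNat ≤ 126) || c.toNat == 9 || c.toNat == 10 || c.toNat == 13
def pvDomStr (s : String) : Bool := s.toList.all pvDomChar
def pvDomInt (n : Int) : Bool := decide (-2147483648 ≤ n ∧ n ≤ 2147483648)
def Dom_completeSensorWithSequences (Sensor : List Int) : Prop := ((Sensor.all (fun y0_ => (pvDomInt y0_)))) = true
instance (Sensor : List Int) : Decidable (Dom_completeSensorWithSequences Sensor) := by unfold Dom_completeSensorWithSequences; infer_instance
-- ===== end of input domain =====

-- B replaces A's imperative while-loop with accumulator and index-based inner loop by a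
-- recursive helper ([seq] + expand(diff)) whose difference row zips the sequence with its
-- tail; objective: simpler. Return values are equal on every input.

-- ===== PORT A =====
-- the inner index loop building Spaces
def pvStepA (nv : List Int) : List Int :=
  (PySem.List.pyRange 0 ((nv.length : Int) - 1) 1).foldl
    (fun spaces k => spaces ++ [PySem.List.pyGetD nv (k + 1) 0 - PySem.List.pyGetD nv k 0]) []

theorem pvStepA_length_lt (nv : List Int) (h : nv ≠ []) : (pvStepA nv).length < nv.length := by
  unfold pvStepA
  rw [PySem.List.foldl_append_singleton_eq_map]
  have : nv.length ≠ 0 := fun hn => h (List.eq_nil_of_length_eq_zero hn)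
  simp [PySem.List.length_pyRange_one]
  omega

-- the while loop; Sensor is the growing accumulator
def pvLoopA (nv : List Int) (sensor : List (List Int)) : List (List Int) :=
  if nv.all (fun v => v == 0) then sensor
  else
    let spaces := pvStepA nv
    pvLoopA spaces (sensor ++ [spaces])
termination_by nv.length
decreasing_by
  exact pvStepA_length_lt nv (by rintro rfl; simp_all)

def completeSensorWithSequences (Sensor : List Int) : List (List Int) :=
  pvLoopA Sensor [Sensor]

-- ===== PORT B =====
-- diff = [b - a for a, b in zip(seq, seq[1:])]
def pvStepB (seq : List Int) : List Int :=
  List.zipWith (fun a b => b - a) seq (seq.drop 1)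

def pvExpand (seq : List Int) : List (List Int) :=
  if seq.all (fun v => v == 0) then [seq]
  else [seq] ++ pvExpand (pvStepB seq)
termination_by seq.length
decreasing_by
  simp only [pvStepB, List.length_zipWith]
  have : seq ≠ [] := by rintro rfl; simp_all
  cases seq <;> simp_all

def completeSensorWithSequences_alt (Sensor : List Int) : List (List Int) :=
  pvExpand Sensor

-- ===== PRECONDITION & SPEC =====
def Spec_completeSensorWithSequences (Sensor : List Int) (out : List (List Int)) : Prop := out = completeSensorWithSequences_alt Sensor
instance (Sensor : List Int) (out : List (List Int)) : Decidable (Spec_completeSensorWithSequences Sensor out) := by unfold Spec_completeSensorWithSequences; infer_instance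

-- ===== CLAIM (what is proved, stated in full; the proofs are below) =====
def Claim_equal_completeSensorWithSequences : Prop := ∀ (Sensor : List Int), Dom_completeSensorWithSequences Sensor → Spec_completeSensorWithSequences Sensor (completeSensorWithSequences Sensor)

-- ===== LEMMAS AND PROOFS =====

-- the two difference rows coincide
theorem step_eq (nv : List Int) : pvStepA nv = pvStepB nv := by
  unfold pvStepA pvStepB
  rw [PySem.List.foldl_append_singleton_eq_map]
  apply List.ext_getElem
  · simp [PySem.List.length_pyRange_one, List.length_zipWith]
  · intro i h1 h2
    have hlen : i + 1 < nv.length := by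
      simp [PySem.List.length_pyRange_one] at h1; omega
    simp only [List.nil_append, List.getElem_map, List.getElem_zipWith,
      List.getElem_drop]
    rw [PySem.List.getElem_pyRange_one]
    rw [PySem.List.pyGetD_eq_getElem _ _ (by omega) (by omega),
        PySem.List.pyGetD_eq_getElem _ _ (by omega) (by omega)]
    congr 2 <;> omega

theorem expand_head (seq : List Int) : pvExpand seq = seq :: (pvExpand seq).drop 1 := by
  unfold pvExpand
  split <;> simp

theorem loop_eq (nv : List Int) (sensor : List (List Int)) :
    pvLoopA nv sensor = sensor ++ (pvExpand nv).drop 1 := by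
  induction nv, sensor using pvLoopA.induct with
  | case1 nv sensor h =>
      rw [pvLoopA, if_pos h, pvExpand, if_pos h]
      simp
  | case2 nv sensor h spaces ih =>
      rw [pvLoopA, if_neg h]
      simp only [spaces] at ih ⊢
      rw [ih]
      conv_rhs => rw [pvExpand]
      rw [if_neg h, ← step_eq]
      rw [expand_head (pvStepA nv)]
      simp

-- ===== VERDICT (by name: the statement is the Claim_ definition above) =====
theorem completeSensorWithSequences_spec : Claim_equal_completeSensorWithSequences := by
  intro Sensor _
  unfold Spec_completeSensorWithSequences completeSensorWithSequences completeSensorWithSequences_alt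
  rw [loop_eq]
  conv_rhs => rw [expand_head Sensor]
  simp
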